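-- pv_equiv track=rewrite | github.com/arsensahakyan/PythonHomeworks | homework 13.1.py | efficientRoadNetwork
-- ===== SOURCE A (Python) =====
-- def find_neighbour(num, roads):
--     my_list = []
--     for j in range(len(roads)):
--         if num in roads[j]:
--             if roads[j][0] == num:
--                 my_list.append(roads[j][1])
--             else:
--                 my_list.append(roads[j][0])
--     return my_list
--
-- def efficientRoadNetwork(n, roads):
--     if n == 1:
--         return True
--     for i in range(n):
--         neighbours = tuple(find_neighbour(i, roads))
--         my_set = [*neighbours]
--         for el in neighbours:
--             my_set.extend(find_neighbour(el, roads))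
--         if len(set(my_set)) != n:
--             return False
--     return True
-- ===== SOURCE B (Python) =====
-- def efficientRoadNetwork(n, roads):
--     if n == 1:
--         return True
--     # edge-centric: build adjacency sets, then push each endpoint's
--     # neighbour set across every edge once (no per-node road scans)
--     adj = {}
--     for a, b in roads:
--         adj.setdefault(a, set()).add(b)
--         adj.setdefault(b, set()).add(a)
--     two = {v: set(s) for v, s in adj.items()}
--     for a, b in roads:
--         two[a] |= adj[b]
--         two[b] |= adj[a]
--     return all(len(two.get(i, ())) == n for i in range(n))
-- ===== Notes on version B (the rewrite author's own statement) =====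
-- stated objective: faster
-- what changed: B is edge-centric: it builds adjacency sets in one pass over the roads, then pushes each endpoint's neighbour set across every edge once to obtain all 2-hop sets simultaneously, and finally checks len==n for i in range(n); A re-scans the whole road list per node and again per neighbour inside a per-node gathering loop.
import Mathlib
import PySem

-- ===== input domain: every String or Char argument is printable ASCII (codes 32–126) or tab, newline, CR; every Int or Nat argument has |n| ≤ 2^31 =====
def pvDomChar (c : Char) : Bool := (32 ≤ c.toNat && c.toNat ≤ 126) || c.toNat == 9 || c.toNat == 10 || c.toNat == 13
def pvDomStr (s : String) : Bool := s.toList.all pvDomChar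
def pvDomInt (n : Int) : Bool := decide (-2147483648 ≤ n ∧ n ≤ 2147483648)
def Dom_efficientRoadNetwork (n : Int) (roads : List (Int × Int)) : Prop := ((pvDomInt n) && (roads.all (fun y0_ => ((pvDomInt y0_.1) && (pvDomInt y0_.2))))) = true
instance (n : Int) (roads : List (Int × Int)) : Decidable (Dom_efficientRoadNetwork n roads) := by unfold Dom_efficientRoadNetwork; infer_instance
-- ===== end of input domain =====

-- B replaces A's per-node road-list rescans with one edge-centric propagation pass
-- (adjacency sets built once, then pushed across every edge once); objective: faster.


-- ===== PORT A =====
def findNeighbour (num : Int) (roads : List (Int × Int)) : List Int :=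
  roads.foldl (fun acc r =>
    if num = r.1 ∨ num = r.2 then
      if r.1 = num then acc ++ [r.2] else acc ++ [r.1]
    else acc) []

-- 'for i in range(n)' with early 'return False' as a counter loop
def loopA (n : Int) (roads : List (Int × Int)) (i : Int) : Bool :=
  if i < n then
    let neighbours := findNeighbour i roads
    let mySet := neighbours.foldl (fun acc el => acc ++ findNeighbour el roads) neighbours
    if PySem.List.len (PySem.Set.ofList mySet) ≠ n then false
    else loopA n roads (i + 1)
  else true
termination_by (n - i).toNat
decreasing_by omega

def efficientRoadNetwork (n : Int) (roads : List (Int × Int)) : Bool :=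
  if n = 1 then true else loopA n roads 0

-- ===== PORT B =====
-- adj.setdefault(a, set()).add(b); adj.setdefault(b, set()).add(a)  per edge
def adjB (roads : List (Int × Int)) : PySem.Dict Int (PySem.Set Int) :=
  roads.foldl (fun d r =>
    (d.modify r.1 PySem.Set.empty (fun s => s.add r.2)).modify r.2 PySem.Set.empty (fun s => s.add r.1))
    PySem.Dict.empty

-- two = {v: set(s) for v, s in adj.items()}; for a, b in roads: two[a] |= adj[b]; two[b] |= adj[a]
def twoB (adj : PySem.Dict Int (PySem.Set Int)) (roads : List (Int × Int)) : PySem.Dict Int (PySem.Set Int) :=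
  roads.foldl (fun t r =>
    (t.modify r.1 PySem.Set.empty (fun s => PySem.Set.update s (adj.getD r.2 PySem.Set.empty))).modify
      r.2 PySem.Set.empty (fun s => PySem.Set.update s (adj.getD r.1 PySem.Set.empty)))
    adj

-- all(len(two.get(i, ())) == n for i in range(n)) — a lazy generator, ported as a
-- short-circuiting counter loop
def allTwoB (n : Int) (two : PySem.Dict Int (PySem.Set Int)) (i : Int) : Bool :=
  if i < n then
    if PySem.Set.len (two.getD i PySem.Set.empty) == n then allTwoB n two (i + 1) else false
  else true
termination_by (n - i).toNat
decreasing_by omega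

def efficientRoadNetwork_alt (n : Int) (roads : List (Int × Int)) : Bool :=
  if n = 1 then true
  else
    let two := twoB (adjB roads) roads
    allTwoB n two 0

-- ===== PRECONDITION & SPEC =====
def Spec_efficientRoadNetwork (n : Int) (roads : List (Int × Int)) (out : Bool) : Prop := out = efficientRoadNetwork_alt n roads
instance (n : Int) (roads : List (Int × Int)) (out : Bool) : Decidable (Spec_efficientRoadNetwork n roads out) := by unfold Spec_efficientRoadNetwork; infer_instance

-- ===== CLAIM (what is proved, stated in full; the proofs are below) =====
def Claim_equal_efficientRoadNetwork : Prop := ∀ (n : Int) (roads : List (Int × Int)), Dom_efficientRoadNetwork n roads → Spec_efficientRoadNetwork n roads (efficientRoadNetwork n roads)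

-- ===== LEMMAS AND PROOFS =====

-- find_neighbour's foldl shifts its accumulator out front
lemma findNeighbour_acc (num : Int) (roads : List (Int × Int)) (acc : List Int) :
    roads.foldl (fun acc r =>
      if num = r.1 ∨ num = r.2 then
        if r.1 = num then acc ++ [r.2] else acc ++ [r.1]
      else acc) acc = acc ++ findNeighbour num roads := by
  induction roads generalizing acc with
  | nil => simp [findNeighbour]
  | cons r rest ih =>
    simp only [findNeighbour, List.foldl_cons] at *
    split_ifs
    · rw [ih (acc ++ [r.2]), ih ([] ++ [r.2])]; simp
    · rw [ih (acc ++ [r.1]), ih ([] ++ [r.1])]; simp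
    · rw [ih acc]

lemma findNeighbour_cons (num : Int) (r : Int × Int) (rest : List (Int × Int)) :
    findNeighbour num (r :: rest)
      = (if num = r.1 ∨ num = r.2 then if r.1 = num then [r.2] else [r.1] else [])
          ++ findNeighbour num rest := by
  conv_lhs => rw [findNeighbour]
  rw [List.foldl_cons, findNeighbour_acc]
  split_ifs <;> simp

-- membership in A's neighbour list
lemma mem_findNeighbour (num x : Int) (roads : List (Int × Int)) :
    x ∈ findNeighbour num roads ↔
      ∃ r ∈ roads, (r.1 = num ∧ x = r.2) ∨ (r.1 ≠ num ∧ r.2 = num ∧ x = r.1) := by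
  induction roads with
  | nil => simp [findNeighbour]
  | cons r rest ih =>
    rw [findNeighbour_cons]
    simp only [List.mem_append, ih, List.mem_cons]
    constructor
    · rintro (hx | ⟨r', hr', hc⟩)
      · split_ifs at hx with h1 h2
        · simp at hx; exact ⟨r, Or.inl rfl, Or.inl ⟨h2, hx⟩⟩
        · simp at hx
          rcases h1 with h1 | h1
          · exact absurd h1.symm h2
          · exact ⟨r, Or.inl rfl, Or.inr ⟨h2, h1.symm, hx⟩⟩
        · simp at hx
      · exact ⟨r', Or.inr hr', hc⟩
    · rintro ⟨r', hr' | hr', hc⟩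
      · subst hr'
        left
        rcases hc with ⟨h1, h2⟩ | ⟨h1, h2, h3⟩
        · simp [h1, h2]
        · simp [h2, h1, Ne.symm h1, h3]
      · exact Or.inr ⟨r', hr', hc⟩

-- one edge-step of B's adjacency fold, as a membership statement
lemma mem_adjStep (d : PySem.Dict Int (PySem.Set Int)) (r : Int × Int) (i x : Int) :
    x ∈ ((d.modify r.1 PySem.Set.empty (fun s => s.add r.2)).modify r.2 PySem.Set.empty
          (fun s => s.add r.1)).getD i PySem.Set.empty ↔
      x ∈ d.getD i PySem.Set.empty ∨ (r.1 = i ∧ x = r.2) ∨ (r.2 = i ∧ x = r.1) := by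
  simp only [PySem.Dict.getD_modify]
  by_cases h2 : i = r.2 <;> by_cases h1 : i = r.1 <;>
    simp_all [PySem.Set.mem_add, eq_comm]

lemma mem_adjB (i x : Int) (roads : List (Int × Int)) :
    x ∈ (adjB roads).getD i PySem.Set.empty ↔
      ∃ r ∈ roads, (r.1 = i ∧ x = r.2) ∨ (r.2 = i ∧ x = r.1) := by
  suffices h : ∀ d : PySem.Dict Int (PySem.Set Int),
      x ∈ (roads.foldl (fun d r =>
        (d.modify r.1 PySem.Set.empty (fun s => s.add r.2)).modify r.2 PySem.Set.empty
          (fun s => s.add r.1)) d).getD i PySem.Set.empty ↔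
      x ∈ d.getD i PySem.Set.empty ∨ ∃ r ∈ roads, (r.1 = i ∧ x = r.2) ∨ (r.2 = i ∧ x = r.1) by
    simpa [adjB, PySem.Dict.getD_empty] using h PySem.Dict.empty
  induction roads with
  | nil => intro d; simp
  | cons r rest ih =>
    intro d
    rw [List.foldl_cons, ih, mem_adjStep]
    simp only [List.mem_cons]
    constructor
    · rintro ((h | h) | ⟨r', hr', hc⟩)
      · exact Or.inl h
      · exact Or.inr ⟨r, Or.inl rfl, h⟩
      · exact Or.inr ⟨r', Or.inr hr', hc⟩
    · rintro (h | ⟨r', hr' | hr', hc⟩)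
      · exact Or.inl (Or.inl h)
      · subst hr'; exact Or.inl (Or.inr hc)
      · exact Or.inr ⟨r', hr', hc⟩

lemma nodup_adjB (i : Int) (roads : List (Int × Int)) :
    ((adjB roads).getD i PySem.Set.empty).Nodup := by
  suffices h : ∀ d : PySem.Dict Int (PySem.Set Int),
      (∀ k, (d.getD k PySem.Set.empty).Nodup) →
      ∀ k, ((roads.foldl (fun d r =>
        (d.modify r.1 PySem.Set.empty (fun s => s.add r.2)).modify r.2 PySem.Set.empty
          (fun s => s.add r.1)) d).getD k PySem.Set.empty).Nodup by
    exact h PySem.Dict.empty (fun k => by simp [PySem.Dict.getD_empty, PySem.Set.empty]) i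
  intro d hd
  induction roads generalizing d with
  | nil => exact hd
  | cons r rest ih =>
    intro k
    rw [List.foldl_cons]
    refine ih _ (fun k' => ?_) k
    simp only [PySem.Dict.getD_modify]
    split_ifs <;> first
      | exact hd _
      | exact PySem.Set.nodup_add _ _ (hd _)
      | exact PySem.Set.nodup_add _ _ (PySem.Set.nodup_add _ _ (hd _))

-- the two per-node 1-hop membership conditions agree (the only delta is a self-loop, where both give i)
lemma mem_adjB_eq_findNeighbour (i x : Int) (roads : List (Int × Int)) :
    x ∈ (adjB roads).getD i PySem.Set.empty ↔ x ∈ findNeighbour i roads := by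
  rw [mem_adjB, mem_findNeighbour]
  constructor
  · rintro ⟨r, hr, ⟨h1, h2⟩ | ⟨h1, h2⟩⟩
    · exact ⟨r, hr, Or.inl ⟨h1, h2⟩⟩
    · by_cases hA : r.1 = i
      · exact ⟨r, hr, Or.inl ⟨hA, by rw [h2, hA, ← h1]⟩⟩
      · exact ⟨r, hr, Or.inr ⟨hA, h1, h2⟩⟩
  · rintro ⟨r, hr, ⟨h1, h2⟩ | ⟨h1, h2, h3⟩⟩
    · exact ⟨r, hr, Or.inl ⟨h1, h2⟩⟩
    · exact ⟨r, hr, Or.inr ⟨h2, h3⟩⟩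

-- one edge-step of the propagation fold
lemma mem_twoStep (adj t : PySem.Dict Int (PySem.Set Int)) (r : Int × Int) (i x : Int) :
    x ∈ ((t.modify r.1 PySem.Set.empty (fun s => PySem.Set.update s (adj.getD r.2 PySem.Set.empty))).modify
          r.2 PySem.Set.empty (fun s => PySem.Set.update s (adj.getD r.1 PySem.Set.empty))).getD i PySem.Set.empty ↔
      x ∈ t.getD i PySem.Set.empty ∨ (r.1 = i ∧ x ∈ adj.getD r.2 PySem.Set.empty) ∨
        (r.2 = i ∧ x ∈ adj.getD r.1 PySem.Set.empty) := by
  simp only [PySem.Dict.getD_modify]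
  by_cases h2 : i = r.2 <;> by_cases h1 : i = r.1 <;>
    simp_all [PySem.Set.mem_update, eq_comm]

lemma mem_twoB (adj : PySem.Dict Int (PySem.Set Int)) (roads : List (Int × Int)) (i x : Int) :
    x ∈ (twoB adj roads).getD i PySem.Set.empty ↔
      x ∈ adj.getD i PySem.Set.empty ∨
        ∃ r ∈ roads, (r.1 = i ∧ x ∈ adj.getD r.2 PySem.Set.empty) ∨
                     (r.2 = i ∧ x ∈ adj.getD r.1 PySem.Set.empty) := by
  suffices h : ∀ t : PySem.Dict Int (PySem.Set Int),
      x ∈ (roads.foldl (fun t r =>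
        (t.modify r.1 PySem.Set.empty (fun s => PySem.Set.update s (adj.getD r.2 PySem.Set.empty))).modify
          r.2 PySem.Set.empty (fun s => PySem.Set.update s (adj.getD r.1 PySem.Set.empty))) t).getD i PySem.Set.empty ↔
      x ∈ t.getD i PySem.Set.empty ∨
        ∃ r ∈ roads, (r.1 = i ∧ x ∈ adj.getD r.2 PySem.Set.empty) ∨
                     (r.2 = i ∧ x ∈ adj.getD r.1 PySem.Set.empty) by
    exact h adj
  induction roads with
  | nil => intro t; simp
  | cons r rest ih =>
    intro t
    rw [List.foldl_cons, ih, mem_twoStep]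
    simp only [List.mem_cons]
    constructor
    · rintro ((h | h) | ⟨r', hr', hc⟩)
      · exact Or.inl h
      · exact Or.inr ⟨r, Or.inl rfl, h⟩
      · exact Or.inr ⟨r', Or.inr hr', hc⟩
    · rintro (h | ⟨r', hr' | hr', hc⟩)
      · exact Or.inl (Or.inl h)
      · subst hr'; exact Or.inl (Or.inr hc)
      · exact Or.inr ⟨r', hr', hc⟩

lemma nodup_twoB (adj : PySem.Dict Int (PySem.Set Int)) (roads : List (Int × Int)) (i : Int)
    (h : ∀ k, (adj.getD k PySem.Set.empty).Nodup) :
    ((twoB adj roads).getD i PySem.Set.empty).Nodup := by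
  suffices hgen : ∀ t : PySem.Dict Int (PySem.Set Int),
      (∀ k, (t.getD k PySem.Set.empty).Nodup) →
      ∀ k, ((roads.foldl (fun t r =>
        (t.modify r.1 PySem.Set.empty (fun s => PySem.Set.update s (adj.getD r.2 PySem.Set.empty))).modify
          r.2 PySem.Set.empty (fun s => PySem.Set.update s (adj.getD r.1 PySem.Set.empty))) t).getD k PySem.Set.empty).Nodup by
    exact hgen adj h i
  intro t ht
  induction roads generalizing t with
  | nil => exact ht
  | cons r rest ih =>
    intro k
    rw [List.foldl_cons]
    refine ih _ (fun k' => ?_) k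
    simp only [PySem.Dict.getD_modify]
    split_ifs <;> first
      | exact ht _
      | exact PySem.Set.nodup_update _ _ (ht _)
      | exact PySem.Set.nodup_update _ _ (PySem.Set.nodup_update _ _ (ht _))

-- A's per-node 2-hop set and B's propagated set have the same members
lemma mem_two_eq (roads : List (Int × Int)) (i x : Int) :
    x ∈ (twoB (adjB roads) roads).getD i PySem.Set.empty ↔
      x ∈ PySem.Set.ofList
        ((findNeighbour i roads).foldl (fun acc el => acc ++ findNeighbour el roads)
          (findNeighbour i roads)) := by
  rw [PySem.List.foldl_append_eq_flatMap]
  rw [mem_twoB]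
  simp only [PySem.Set.mem_ofList, List.mem_append, List.mem_flatMap,
    mem_adjB_eq_findNeighbour]
  constructor
  · rintro (h | ⟨r, hr, ⟨h1, h2⟩ | ⟨h1, h2⟩⟩)
    · exact Or.inl h
    · refine Or.inr ⟨r.2, ?_, h2⟩
      rw [mem_findNeighbour]; exact ⟨r, hr, Or.inl ⟨h1, rfl⟩⟩
    · refine Or.inr ⟨r.1, ?_, h2⟩
      rw [mem_findNeighbour]
      by_cases hA : r.1 = i
      · exact ⟨r, hr, Or.inl ⟨hA, by rw [hA, ← h1]⟩⟩
      · exact ⟨r, hr, Or.inr ⟨hA, h1, rfl⟩⟩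
  · rintro (h | ⟨v, hv, hx⟩)
    · exact Or.inl h
    · rw [mem_findNeighbour] at hv
      obtain ⟨r, hr, ⟨h1, h2⟩ | ⟨h1, h2, h3⟩⟩ := hv
      · exact Or.inr ⟨r, hr, Or.inl ⟨h1, by rwa [← h2]⟩⟩
      · exact Or.inr ⟨r, hr, Or.inr ⟨h2, by rwa [← h3]⟩⟩

-- hence the same cardinality
lemma len_two_eq (roads : List (Int × Int)) (i : Int) :
    PySem.Set.len ((twoB (adjB roads) roads).getD i PySem.Set.empty)
      = PySem.List.len (PySem.Set.ofList
          ((findNeighbour i roads).foldl (fun acc el => acc ++ findNeighbour el roads)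
            (findNeighbour i roads))) := by
  have hperm : ((twoB (adjB roads) roads).getD i PySem.Set.empty).Perm
      (PySem.Set.ofList
        ((findNeighbour i roads).foldl (fun acc el => acc ++ findNeighbour el roads)
          (findNeighbour i roads))) := by
    rw [List.perm_ext_iff_of_nodup
      (nodup_twoB _ _ _ (fun k => nodup_adjB k roads)) (PySem.Set.nodup_ofList _)]
    exact fun x => mem_two_eq roads i x
  simp only [PySem.Set.len, PySem.List.len_eq]
  exact_mod_cast hperm.length_eq

-- the Bool shape of one loop step
lemma ite_ne_step (L n : Int) (R : Bool) :
    (if L ≠ n then false else R) = (if L == n then R else false) := by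
  by_cases h : L = n <;> simp [h]

lemma loopA_eq_allTwoB (n : Int) (roads : List (Int × Int)) (i : Int) :
    loopA n roads i = allTwoB n (twoB (adjB roads) roads) i := by
  by_cases h : i < n
  · rw [loopA, allTwoB]
    simp only [h, if_true]
    rw [loopA_eq_allTwoB n roads (i + 1), ← len_two_eq, ite_ne_step]
  · rw [loopA, allTwoB]; simp [h]
termination_by (n - i).toNat
decreasing_by omega

-- ===== VERDICT (by name: the statement is the Claim_ definition above) =====
theorem efficientRoadNetwork_spec : Claim_equal_efficientRoadNetwork := by
  intro n roads _
  unfold Spec_efficientRoadNetwork efficientRoadNetwork efficientRoadNetwork_alt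
  by_cases h : n = 1
  · simp [h]
  · simp only [h, if_false]
    exact loopA_eq_allTwoB n roads 0
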